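-- pv_equiv track=rewrite | github.com/tomilov-dev/DSA | leetcode_contests/w473/q3.py | countStableSubarrays
-- ===== SOURCE A (Python) =====
-- import bisect
--
-- def countStableSubarrays(capacity: list[int]) -> int:
--     n = len(capacity)
--     pref = [0] * (n + 1)
--     for i in range(1, n + 1):
--         pref[i] = pref[i - 1] + capacity[i - 1]
--
--     index: dict[int, list[int]] = dict()
--     for i, v in enumerate(capacity):
--         if v not in index:
--             index[v] = []
--         index[v].append(i)
--
--     res = 0
--     for left in range(n - 2):
--         value = capacity[left]
--         target_sum = pref[left + 1] + value
--         indexes = index[value]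
--         pos = bisect.bisect_right(indexes, left + 1)
--         for right in indexes[pos:]:
--             if pref[right] == target_sum:
--                 res += 1
--     return res
-- ===== SOURCE B (Python) =====
-- def countStableSubarrays(capacity: list[int]) -> int:
--     # One pass: for each right, count earlier lefts (left <= right-2) sharing
--     # capacity value and satisfying pref[right] == pref[left+1] + capacity[left],
--     # via a hash counter keyed by (value, required prefix sum).
--     n = len(capacity)
--     pref = [0] * (n + 1)
--     for i in range(n):
--         pref[i + 1] = pref[i] + capacity[i]
--     count: dict[tuple[int, int], int] = {}
--     res = 0
--     for right in range(n):
--         if right >= 2: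
--             left = right - 2
--             key = (capacity[left], pref[left + 1] + capacity[left])
--             count[key] = count.get(key, 0) + 1
--         res += count.get((capacity[right], pref[right]), 0)
--     return res
-- ===== Notes on version B (the rewrite author's own statement) =====
-- stated objective: faster
-- what changed: replaces A's per-left bisect-then-scan over per-value index lists by a single left-to-right pass that counts matching earlier left endpoints with a hash counter keyed by (value, required prefix sum)
import Mathlib
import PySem

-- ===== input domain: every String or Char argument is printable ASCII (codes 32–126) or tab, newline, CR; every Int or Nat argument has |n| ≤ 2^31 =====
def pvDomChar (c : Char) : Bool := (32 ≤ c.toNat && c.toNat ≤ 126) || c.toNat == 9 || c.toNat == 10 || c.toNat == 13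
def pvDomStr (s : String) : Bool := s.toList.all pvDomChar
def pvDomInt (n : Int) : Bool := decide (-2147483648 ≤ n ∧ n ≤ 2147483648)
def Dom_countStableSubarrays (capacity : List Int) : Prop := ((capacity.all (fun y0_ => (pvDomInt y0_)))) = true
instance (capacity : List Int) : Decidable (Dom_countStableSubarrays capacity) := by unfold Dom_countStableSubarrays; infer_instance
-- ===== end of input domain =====

-- B replaces A's per-left bisect-and-scan over per-value index lists by one
-- left-to-right pass with a hash counter keyed by (value, required prefix sum).

-- ===== PORT A =====
-- 'for i in range(1, n+1): pref[i] = pref[i-1] + capacity[i-1]' as structural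
-- recursion carrying pref[i-1]; '0 :: pvPrefLoop 0 capacity' is the pref array.
def pvPrefLoop (acc : Int) : List Int → List Int
  | [] => []
  | c :: cs => (acc + c) :: pvPrefLoop (acc + c) cs

-- body of A's 'for left in range(n - 2)' loop
def pvStepA (capacity pref : List Int) (index : PySem.Dict Int (List Int))
    (res : Int) (left : Int) : Int :=
  let value := PySem.List.pyGetD capacity left 0
  let targetSum := PySem.List.pyGetD pref (left + 1) 0 + value
  let indexes := index.getD value []
  let pos : Nat := PySem.List.bisectRight indexes (left + 1)
  (PySem.List.slice indexes (some (pos : Int)) none).foldl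
    (fun r right => if PySem.List.pyGetD pref right 0 = targetSum then r + 1 else r) res

def countStableSubarrays (capacity : List Int) : Int :=
  let n : Int := capacity.length
  let pref : List Int := 0 :: pvPrefLoop 0 capacity
  -- 'if v not in index: index[v] = []' then 'index[v].append(i)' is exactly
  -- 'index[v] = index.get(v, []) + [i]', i.e. Dict.modify with default [].
  let index : PySem.Dict Int (List Int) :=
    (PySem.List.enumerate capacity).foldl
      (fun d p => d.modify p.2 [] (fun l => l ++ [p.1])) PySem.Dict.empty
  (PySem.List.pyRange 0 (n - 2) 1).foldl (pvStepA capacity pref index) 0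

-- ===== PORT B =====
-- body of B's 'for right in range(n)' loop; state = (counter dict, res)
def pvStepB (capacity pref : List Int)
    (st : PySem.Dict (Int × Int) Int × Int) (right : Int) :
    PySem.Dict (Int × Int) Int × Int :=
  let count := if (2:Int) ≤ right then
      let left := right - 2
      let key := (PySem.List.pyGetD capacity left 0,
                  PySem.List.pyGetD pref (left + 1) 0 + PySem.List.pyGetD capacity left 0)
      st.1.insert key (st.1.getD key 0 + 1)
    else st.1
  (count, st.2 + count.getD
      (PySem.List.pyGetD capacity right 0, PySem.List.pyGetD pref right 0) 0)

def countStableSubarrays_alt (capacity : List Int) : Int :=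
  let n : Int := capacity.length
  -- B's prefix loop 'pref[i+1] = pref[i] + capacity[i]' builds the same array
  let pref : List Int := 0 :: pvPrefLoop 0 capacity
  ((PySem.List.pyRange 0 n 1).foldl (pvStepB capacity pref)
    (PySem.Dict.empty, 0)).2

-- ===== PRECONDITION & SPEC =====
def Spec_countStableSubarrays (capacity : List Int) (out : Int) : Prop := out = countStableSubarrays_alt capacity
instance (capacity : List Int) (out : Int) : Decidable (Spec_countStableSubarrays capacity out) := by unfold Spec_countStableSubarrays; infer_instance

-- ===== CLAIM (what is proved, stated in full; the proofs are below) =====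
def Claim_equal_countStableSubarrays : Prop := ∀ (capacity : List Int), Dom_countStableSubarrays capacity → Spec_countStableSubarrays capacity (countStableSubarrays capacity)

-- ===== LEMMAS AND PROOFS =====

-- P i = pref[i]; the stable-pair condition shared by both counts
def pvC (capacity : List Int) (l r : Nat) : Bool :=
  (capacity.getD r 0 == capacity.getD l 0) && decide (l + 2 ≤ r)
    && ((capacity.take r).sum == (capacity.take (l + 1)).sum + capacity.getD l 0)

-- the common value both programs compute
def pvT (capacity : List Int) : Int :=
  ∑ l ∈ Finset.range capacity.length, ∑ r ∈ Finset.range capacity.length,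
    (if pvC capacity l r then (1:Int) else 0)

def pvKeyL (capacity : List Int) (l : Nat) : Int × Int :=
  (capacity.getD l 0, (capacity.take (l + 1)).sum + capacity.getD l 0)

def pvKeyR (capacity : List Int) (r : Nat) : Int × Int :=
  (capacity.getD r 0, (capacity.take r).sum)

theorem pvPrefLoop_eq (cs : List Int) : ∀ acc : Int,
    pvPrefLoop acc cs = (List.range cs.length).map (fun j => acc + (cs.take (j + 1)).sum) := by
  induction cs with
  | nil => intro acc; simp [pvPrefLoop]
  | cons c cs ih =>
    intro acc
    simp [pvPrefLoop, ih (acc + c), List.length_cons, List.range_succ_eq_map,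
      List.map_map, Function.comp_def, add_assoc]

theorem pv_pref_getD (capacity : List Int) (i : Nat) (h : i ≤ capacity.length) :
    (0 :: pvPrefLoop 0 capacity).getD i 0 = (capacity.take i).sum := by
  cases i with
  | zero => simp
  | succ j =>
    have hj : j < capacity.length := by omega
    simp [pvPrefLoop_eq, List.getD, hj]

theorem pv_index_getD (capacity : List Int) (v : Int) :
    ((PySem.List.enumerate capacity).foldl
      (fun d p => d.modify p.2 [] (fun l => l ++ [p.1])) PySem.Dict.empty).getD v []
    = ((List.range capacity.length).filter
        (fun k => capacity.getD k 0 == v)).map (fun k : Nat => (k : Int)) := by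
  have h1 : (PySem.List.enumerate capacity).foldl
      (fun d p => d.modify p.2 [] (fun l => l ++ [p.1])) (PySem.Dict.empty : PySem.Dict Int (List Int))
      = ((PySem.List.enumerate capacity).map (fun q => (q.2, q.1))).foldl
        (fun d p => d.modify p.1 [] (fun l => l ++ [p.2])) PySem.Dict.empty := by
    rw [List.foldl_map]
  rw [h1, PySem.Dict.getD_foldl_modify_append]
  rw [PySem.List.enumerate_eq_map_pyRange capacity 0, PySem.List.len_eq,
    PySem.List.pyRange_zero_natCast]
  simp [List.filter_map, List.map_map, Function.comp_def, PySem.List.pyGetD_natCast, pysem]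

theorem pv_drop_bisect (xs : List Int) (h : xs.Pairwise (· ≤ ·)) (x : Int) :
    xs.drop (PySem.List.bisectRight xs x) = xs.filter (fun a => decide (x < a)) := by
  obtain ⟨hle, hlo, hhi⟩ := PySem.List.bisectRight_spec xs x h
  have h2 : (List.drop (PySem.List.bisectRight xs x) xs).filter (fun a => decide (x < a))
      = List.drop (PySem.List.bisectRight xs x) xs := by
    apply List.filter_eq_self.mpr
    intro a ha
    obtain ⟨i, hi, hia⟩ := List.mem_iff_getElem.mp ha
    rw [List.getElem_drop] at hia
    have hlen : PySem.List.bisectRight xs x + i < xs.length := by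
      have := hi; simp [List.length_drop] at this; omega
    have := hhi (PySem.List.bisectRight xs x + i) hlen (by omega)
    simp only [decide_eq_true_eq, ← hia]
    omega
  have h1 : (List.take (PySem.List.bisectRight xs x) xs).filter (fun a => decide (x < a))
      = [] := by
    apply List.filter_eq_nil_iff.mpr
    intro a ha
    obtain ⟨i, hi, hia⟩ := List.mem_iff_getElem.mp ha
    have hlen : i < xs.length := by
      have := hi; simp [List.length_take] at this; omega
    have hipos : i < PySem.List.bisectRight xs x := by
      have := hi; simp [List.length_take] at this; omega
    have := hlo i hlen hipos
    rw [List.getElem_take] at hia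
    simp only [decide_eq_true_eq, ← hia]
    omega
  conv_rhs => rw [← List.take_append_drop (PySem.List.bisectRight xs x) xs]
  rw [List.filter_append, h1, h2, List.nil_append]

theorem pv_countP_range_sum (p : Nat → Bool) (k : Nat) :
    ((List.countP p (List.range k)) : Int)
      = ∑ i ∈ Finset.range k, (if p i then (1:Int) else 0) := by
  rw [← PySem.List.sum_map_ite_one_zero]
  rfl

theorem pv_foldl_count (p : Int → Prop) [DecidablePred p] (l : List Int) (a : Int) :
    l.foldl (fun acc x => if p x then acc + 1 else acc) a
      = a + ((l.countP (fun x => decide (p x))) : Int) := by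
  have h := PySem.List.foldl_count_if (fun x => decide (p x)) l a
  simpa using h

theorem pv_stepA_eq (capacity : List Int) (res : Int) (l : Nat)
    (hl : l < capacity.length - 2) :
    pvStepA capacity (0 :: pvPrefLoop 0 capacity)
      ((PySem.List.enumerate capacity).foldl
        (fun d p => d.modify p.2 [] (fun lst => lst ++ [p.1])) PySem.Dict.empty)
      res ((0:Int) + ↑l)
    = res + (List.countP (fun r => pvC capacity l r) (List.range capacity.length) : Int) := by
  have hlen : l + 2 < capacity.length := by omega
  have hcast1 : ((0:Int) + (l:Int)) = ((l : Nat) : Int) := by ring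
  have hcast2 : ((l:Int) + 1) = (((l + 1 : Nat)) : Int) := by push_cast; ring
  simp only [pvStepA, hcast1, hcast2, PySem.List.pyGetD_natCast]
  rw [pv_pref_getD capacity (l+1) (by omega), pv_index_getD]
  have hsorted : (((List.range capacity.length).filter
      (fun k => capacity.getD k 0 == capacity.getD l 0)).map (fun k : Nat => (k : Int))).Pairwise (· ≤ ·) := by
    rw [List.pairwise_map]
    exact (List.pairwise_lt_range.sublist List.filter_sublist).imp
      (fun h => by exact_mod_cast Nat.le_of_lt h)
  rw [PySem.List.slice_from_natCast, pv_drop_bisect _ hsorted]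
  rw [pv_foldl_count]
  congr 1
  rw [Nat.cast_inj]
  rw [List.countP_filter, List.countP_map, List.countP_filter]
  apply List.countP_congr
  intro r hr
  have hrn : r < capacity.length := List.mem_range.mp hr
  have hPr : (0 :: pvPrefLoop 0 capacity).getD r 0 = (capacity.take r).sum :=
    pv_pref_getD capacity r (by omega)
  simp only [Function.comp_def, PySem.List.pyGetD_natCast, hPr, pvC,
    Bool.and_eq_true, decide_eq_true_eq, beq_iff_eq]
  constructor
  · rintro ⟨⟨h1, h2⟩, h3⟩
    exact ⟨⟨h3, by omega⟩, h1⟩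
  · rintro ⟨⟨h1, h2⟩, h3⟩
    exact ⟨⟨h3, by omega⟩, h1⟩

theorem pv_A_eq (capacity : List Int) : countStableSubarrays capacity = pvT capacity := by
  simp only [countStableSubarrays]
  have hm : (((capacity.length : Int)) - 2 - 0).toNat = capacity.length - 2 := by omega
  rw [PySem.List.pyRange_one, hm, List.foldl_map]
  rw [PySem.List.foldl_congr_mem _ _
    (fun res (l : Nat) => res + (List.countP (fun r => pvC capacity l r)
      (List.range capacity.length) : Int)) 0
    (fun res l hlmem => pv_stepA_eq capacity res l (List.mem_range.mp hlmem))]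
  rw [PySem.List.foldl_add _ _ 0, zero_add]
  have hsum : ((List.range (capacity.length - 2)).map
      (fun l => (List.countP (fun r => pvC capacity l r) (List.range capacity.length) : Int))).sum
      = ∑ l ∈ Finset.range (capacity.length - 2),
          (List.countP (fun r => pvC capacity l r) (List.range capacity.length) : Int) := rfl
  rw [hsum]
  rw [Finset.sum_subset (show Finset.range (capacity.length - 2) ⊆ Finset.range capacity.length from fun x hx => Finset.mem_range.mpr (lt_of_lt_of_le (Finset.mem_range.mp hx) (Nat.sub_le _ _))) ?_]
  · unfold pvT
    apply Finset.sum_congr rfl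
    intro l _
    rw [pv_countP_range_sum]
  · intro l _ hl
    have hlge : capacity.length - 2 ≤ l := by
      simpa using Finset.mem_range.not.mp hl
    norm_cast
    rw [List.countP_eq_zero]
    intro r hrmem
    have : r < capacity.length := List.mem_range.mp hrmem
    simp only [pvC, Bool.and_eq_true, decide_eq_true_eq, beq_iff_eq]
    rintro ⟨⟨-, h2⟩, -⟩
    omega

theorem pv_B_inv (capacity : List Int) : ∀ m, m ≤ capacity.length →
    (∀ k, (((List.range m).foldl
        (fun st (r : Nat) => pvStepB capacity (0 :: pvPrefLoop 0 capacity) st ↑r)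
        (PySem.Dict.empty, 0)).1.getD k 0)
      = (((List.range (m - 2)).map (pvKeyL capacity)).count k : Int))
    ∧ ((((List.range m).foldl
        (fun st (r : Nat) => pvStepB capacity (0 :: pvPrefLoop 0 capacity) st ↑r)
        (PySem.Dict.empty, 0)).2)
      = ∑ r ∈ Finset.range m,
          ((((List.range (r - 1)).map (pvKeyL capacity)).count (pvKeyR capacity r) : Nat) : Int)) := by
  intro m
  induction m with
  | zero =>
    intro _
    constructor
    · intro k; simp [pysem]
    · simp
  | succ m ih =>
    intro hm1
    obtain ⟨ihd, ihs⟩ := ih (by omega)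
    rw [List.range_succ, List.foldl_append, List.foldl_cons, List.foldl_nil]
    set Pst := (List.range m).foldl
        (fun st (r : Nat) => pvStepB capacity (0 :: pvPrefLoop 0 capacity) st ↑r)
        ((PySem.Dict.empty, 0) : PySem.Dict (Int × Int) Int × Int) with hPst
    have hkeyR : ((PySem.List.pyGetD capacity (m : Int) 0,
        PySem.List.pyGetD (0 :: pvPrefLoop 0 capacity) (m : Int) 0)) = pvKeyR capacity m := by
      simp only [PySem.List.pyGetD_natCast, pvKeyR]
      rw [pv_pref_getD capacity m (by omega)]
    by_cases h2 : 2 ≤ m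
    · have hif : ((2:Int) ≤ (m:Int)) := by exact_mod_cast h2
      have hc : ((m:Int) - 2) = ((m - 2 : Nat) : Int) := by omega
      have hc1 : (((m - 2 : Nat) : Int) + 1) = ((m - 2 + 1 : Nat) : Int) := by push_cast; ring
      have hd : ∀ k, (pvStepB capacity (0 :: pvPrefLoop 0 capacity) Pst ↑m).1.getD k 0
          = (((List.range (m + 1 - 2)).map (pvKeyL capacity)).count k : Int) := by
        intro k
        simp only [pvStepB, if_pos hif, hc, hc1, PySem.List.pyGetD_natCast]
        rw [pv_pref_getD capacity (m - 2 + 1) (by omega)]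
        rw [PySem.Dict.getD_insert]
        simp only [ihd]
        rw [show m + 1 - 2 = (m - 2) + 1 from by omega, List.range_succ, List.map_append,
          List.count_append]
        simp only [List.map_cons, List.map_nil]
        by_cases hk : k = (capacity.getD (m - 2) 0,
            (capacity.take (m - 2 + 1)).sum + capacity.getD (m - 2) 0)
        · rw [if_pos hk]
          subst hk
          rw [show ((capacity.getD (m - 2) 0,
              (capacity.take (m - 2 + 1)).sum + capacity.getD (m - 2) 0) : Int × Int)
            = pvKeyL capacity (m - 2) from rfl]
          rw [show (List.count (pvKeyL capacity (m - 2)) [pvKeyL capacity (m - 2)]) = 1 from by simp]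
          push_cast
          ring
        · rw [if_neg hk]
          have h0 : ([pvKeyL capacity (m - 2)].count k) = 0 := by
            rw [List.count_eq_zero]
            simp only [List.mem_singleton, pvKeyL]
            exact fun h => hk h
          rw [h0]
          push_cast
          ring
      constructor
      · intro k; exact hd k
      · have h1 := hd (pvKeyR capacity m)
        simp only [pvStepB, if_pos hif] at h1 ⊢
        rw [Finset.sum_range_succ, ← ihs, hkeyR, h1,
          show m + 1 - 2 = m - 1 from by omega]
    · have hif : ¬ ((2:Int) ≤ (m:Int)) := by exact_mod_cast h2
      have hr0 : m + 1 - 2 = m - 2 := by omega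
      constructor
      · intro k
        simp only [pvStepB, if_neg hif]
        rw [hr0]
        exact ihd k
      · simp only [pvStepB, if_neg hif]
        rw [Finset.sum_range_succ, ← ihs, hkeyR, ihd (pvKeyR capacity m),
          show m - 2 = m - 1 from by omega]

theorem pv_B_eq (capacity : List Int) : countStableSubarrays_alt capacity = pvT capacity := by
  simp only [countStableSubarrays_alt]
  rw [PySem.List.pyRange_zero_natCast, List.foldl_map]
  obtain ⟨_, hs⟩ := pv_B_inv capacity capacity.length (le_refl _)
  rw [hs]
  unfold pvT
  rw [Finset.sum_comm]
  apply Finset.sum_congr rfl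
  intro r hr
  have hrn : r < capacity.length := Finset.mem_range.mp hr
  have h1 : (((List.range (r - 1)).map (pvKeyL capacity)).count (pvKeyR capacity r))
      = List.countP (fun l => pvC capacity l r) (List.range (r - 1)) := by
    rw [List.count_eq_countP, List.countP_map]
    apply List.countP_congr
    intro l hl
    have hlr : l < r - 1 := List.mem_range.mp hl
    simp only [Function.comp_def, pvC, pvKeyL, pvKeyR,
      Bool.and_eq_true, decide_eq_true_eq, beq_iff_eq, Prod.mk.injEq]
    constructor
    · rintro ⟨h1, h2⟩
      exact ⟨⟨h1.symm, by omega⟩, h2.symm⟩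
    · rintro ⟨⟨h1, _⟩, h2⟩
      exact ⟨h1.symm, h2.symm⟩
  rw [h1, pv_countP_range_sum]
  rw [Finset.sum_subset (show Finset.range (r - 1) ⊆ Finset.range capacity.length from fun x hx => Finset.mem_range.mpr (by have := Finset.mem_range.mp hx; omega)) ?_]
  intro l _ hl
  have hlge : r - 1 ≤ l := by simpa using Finset.mem_range.not.mp hl
  have hfalse : ¬ (pvC capacity l r = true) := by
    simp only [pvC, Bool.and_eq_true, decide_eq_true_eq, beq_iff_eq]
    rintro ⟨⟨-, h2⟩, -⟩
    omega
  rw [if_neg hfalse]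

-- ===== VERDICT (by name: the statement is the Claim_ definition above) =====
theorem countStableSubarrays_spec : Claim_equal_countStableSubarrays := by
  intro capacity _
  show countStableSubarrays capacity = countStableSubarrays_alt capacity
  rw [pv_A_eq, pv_B_eq]
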